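-- pv_equiv track=rewrite | github.com/remicmacs/AoC | 2017/memory_reallocation/memory_reallocation.py | reallocate
-- ===== SOURCE A (Python) =====
-- import copy
--
-- def reallocate(lCurrentMemoryBanks):
--     """
--         Function to reallocate the memory banks according to the instructions
--         given
--     """
--     # A deep copy is needed so as to create a new list object
--     lReallocated = copy.deepcopy(lCurrentMemoryBanks)
--
--     # The lowest index of the fullest memory banks is found
--     iIndex = findMaxIndex(lReallocated)
--     # The number of blocks to redistribute
--     iRemainingBlocks = lReallocated[iIndex]
--     lReallocated[iIndex] = 0
--
--     iLen = len(lReallocated)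
--
--     # Loop to redistribute every block
--     # Optimization is possible based on the number of blocks to redistribute
--     # divided by the number of blocks but brute force just works for now
--     while iRemainingBlocks > 0:
--         # Modulo operator used to loop through list indexes
--         iIndex = (iIndex + 1) % iLen
--         lReallocated[iIndex] += 1
--         iRemainingBlocks -= 1
--     return lReallocated
--
-- def findMaxIndex(lMemoryBanks):
--     """
--         Helper function to find the index of the first fullest memory bank
--     """
--     iMaxValue = max(lMemoryBanks)
--     iMaxIndex = lMemoryBanks.index(iMaxValue)
--     return iMaxIndex
-- ===== SOURCE B (Python) =====
-- def reallocate(lCurrentMemoryBanks):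
--     """Closed-form redistribution: base share = blocks // n, first
--     (blocks % n) banks after the emptied one get one extra block."""
--     n = len(lCurrentMemoryBanks)
--     blocks = max(lCurrentMemoryBanks)
--     i = lCurrentMemoryBanks.index(blocks)
--     q, r = divmod(blocks, n) if blocks > 0 else (0, 0)
--     return [(0 if j == i else v) + q + (1 if (j - i - 1) % n < r else 0)
--             for j, v in enumerate(lCurrentMemoryBanks)]
-- ===== Notes on version B (the rewrite author's own statement) =====
-- stated objective: faster
-- what changed: Replaces the one-block-at-a-time while loop (one iteration per block) with a closed form: divmod(blocks, n) gives each bank a base share q and the first r banks after the emptied one a single extra block, built in one list comprehension.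
import Mathlib
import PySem

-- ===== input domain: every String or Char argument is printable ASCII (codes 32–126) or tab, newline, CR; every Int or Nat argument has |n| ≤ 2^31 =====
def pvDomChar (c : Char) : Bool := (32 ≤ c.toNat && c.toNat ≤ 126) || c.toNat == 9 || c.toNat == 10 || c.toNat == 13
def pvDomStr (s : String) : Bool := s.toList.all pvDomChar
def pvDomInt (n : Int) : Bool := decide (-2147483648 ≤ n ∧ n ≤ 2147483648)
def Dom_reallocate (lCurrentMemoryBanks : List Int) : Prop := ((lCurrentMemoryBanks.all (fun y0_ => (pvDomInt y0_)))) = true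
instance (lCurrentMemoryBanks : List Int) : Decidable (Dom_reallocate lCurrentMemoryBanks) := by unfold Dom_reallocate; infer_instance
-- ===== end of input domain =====

-- B replaces A's block-by-block while loop by a divmod closed form (one pass, O(n) vs O(blocks)).

-- ===== PORT A =====

-- helper: findMaxIndex(lMemoryBanks); Python raises ValueError on [] (max of empty) — none here
def findMaxIndex (lMemoryBanks : List Int) : Option Nat :=
  match PySem.List.max? lMemoryBanks (fun y => y) with
  | none => none
  | some iMaxValue => PySem.List.index? lMemoryBanks iMaxValue

-- the while-loop of A: while iRemainingBlocks > 0: iIndex = (iIndex+1) % iLen; l[iIndex] += 1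
-- (iIndex stays in [0, iLen) so pySetD/pyGetD are exact for Python's l[iIndex])
def reallocLoop (iLen : Int) (l : List Int) (iIndex iRemainingBlocks : Int) : List Int :=
  if iRemainingBlocks > 0 then
    let iIndex' := PySem.Int.mod (iIndex + 1) iLen
    reallocLoop iLen
      (PySem.List.pySetD l iIndex' (PySem.List.pyGetD l iIndex' 0 + 1))
      iIndex' (iRemainingBlocks - 1)
  else l
termination_by iRemainingBlocks.toNat
decreasing_by omega

def reallocate (lCurrentMemoryBanks : List Int) : List Int :=
  match findMaxIndex lCurrentMemoryBanks with
  | none => []   -- Python raises ValueError here (empty list); excluded by Pre_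
  | some iIndex =>
    let iRemainingBlocks := PySem.List.pyGetD lCurrentMemoryBanks (iIndex : Int) 0
    let lReallocated := PySem.List.pySetD lCurrentMemoryBanks (iIndex : Int) 0
    reallocLoop (lCurrentMemoryBanks.length : Int) lReallocated (iIndex : Int) iRemainingBlocks

-- ===== PORT B =====

def reallocate_alt (lCurrentMemoryBanks : List Int) : List Int :=
  match PySem.List.max? lCurrentMemoryBanks (fun y => y) with
  | none => []   -- Python raises ValueError here (empty list); excluded by Pre_
  | some blocks =>
    let n : Int := (lCurrentMemoryBanks.length : Int)
    let i : Int := (((PySem.List.index? lCurrentMemoryBanks blocks).getD 0 : Nat) : Int)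
    let qr : Int × Int :=
      if blocks > 0 then (PySem.Int.divmod? blocks n).getD (0, 0) else (0, 0)
    (PySem.List.enumerate lCurrentMemoryBanks).map (fun jv =>
      (if jv.1 = i then 0 else jv.2) + qr.1 +
        (if PySem.Int.mod (jv.1 - i - 1) n < qr.2 then 1 else 0))

-- ===== PRECONDITION & SPEC =====
-- Pre_ excludes only the empty list, on which both A and B raise ValueError (max of empty sequence).
def Pre_reallocate (lCurrentMemoryBanks : List Int) : Prop := lCurrentMemoryBanks ≠ []
instance (lCurrentMemoryBanks : List Int) : Decidable (Pre_reallocate lCurrentMemoryBanks) := by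
  unfold Pre_reallocate; infer_instance

def pvWitness_reallocate : List Int := [0, 2, 7, 0]

def Spec_reallocate (lCurrentMemoryBanks : List Int) (out : List Int) : Prop := out = reallocate_alt lCurrentMemoryBanks
instance (lCurrentMemoryBanks : List Int) (out : List Int) : Decidable (Spec_reallocate lCurrentMemoryBanks out) := by unfold Spec_reallocate; infer_instance

-- ===== CLAIM (what is proved, stated in full; the proofs are below) =====
def Claim_equal_reallocate : Prop := ∀ (lCurrentMemoryBanks : List Int), Dom_reallocate lCurrentMemoryBanks → Pre_reallocate lCurrentMemoryBanks → Spec_reallocate lCurrentMemoryBanks (reallocate lCurrentMemoryBanks)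

-- ===== LEMMAS AND PROOFS =====

-- number of increments bank j has received after k steps of the loop starting at iIndex = i
def hits (n : Int) : Nat → Int → Int → Int
  | 0, _, _ => 0
  | k + 1, i, j =>
    (if j = (i + 1) % n then 1 else 0) + hits n k ((i + 1) % n) j

lemma loop_nonpos (n : Int) (l : List Int) (i rem : Int) (h : ¬ rem > 0) :
    reallocLoop n l i rem = l := by
  rw [reallocLoop]; simp [h]

lemma loop_pos (n : Int) (l : List Int) (i rem : Int) (h : rem > 0) :
    reallocLoop n l i rem =
      reallocLoop n
        (PySem.List.pySetD l (PySem.Int.mod (i + 1) n) (PySem.List.pyGetD l (PySem.Int.mod (i + 1) n) 0 + 1))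
        (PySem.Int.mod (i + 1) n) (rem - 1) := by
  rw [reallocLoop]; simp [h]

lemma loop_len (n : Int) : ∀ (k : Nat) (l : List Int) (i : Int),
    (reallocLoop n l i (k : Int)).length = l.length := by
  intro k
  induction k with
  | zero => intro l i; rw [loop_nonpos _ _ _ _ (by omega)]
  | succ k ih =>
    intro l i
    rw [loop_pos _ _ _ _ (by exact_mod_cast Int.natCast_pos.mpr (Nat.succ_pos k))]
    have : ((k + 1 : Nat) : Int) - 1 = (k : Int) := by omega
    rw [this, ih]
    simp [PySem.List.length_pySetD]

lemma loop_get (n : Int) (hn : 0 < n) : ∀ (k : Nat) (l : List Int), ((l.length : Int) = n) →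
    ∀ (i : Int) (j : Nat), j < l.length →
    (reallocLoop n l i (k : Int))[j]? = some (l.getD j 0 + hits n k i (j : Int)) := by
  intro k
  induction k with
  | zero =>
    intro l hl i j hj
    rw [loop_nonpos _ _ _ _ (by omega)]
    simp [hits, List.getD_eq_getElem?_getD, List.getElem?_eq_getElem hj]
  | succ k ih =>
    intro l hl i j hj
    rw [loop_pos _ _ _ _ (by exact_mod_cast Int.natCast_pos.mpr (Nat.succ_pos k))]
    have hstep : ((k + 1 : Nat) : Int) - 1 = (k : Int) := by omega
    rw [hstep]
    set i' : Int := PySem.Int.mod (i + 1) n with hi'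
    have hi'0 : 0 ≤ i' := PySem.Int.mod_nonneg _ hn
    have hi'n : i' < n := PySem.Int.mod_lt _ hn
    have hset : PySem.List.pySetD l i' (PySem.List.pyGetD l i' 0 + 1)
        = l.set i'.toNat (l.getD i'.toNat 0 + 1) := by
      rw [PySem.List.pySetD_of_nonneg _ _ hi'0,
          PySem.List.pyGetD_eq_getElem _ _ hi'0 (by omega)]
      congr 1
      rw [List.getD_eq_getElem?_getD, List.getElem?_eq_getElem (by omega : i'.toNat < l.length)]
      simp
    rw [hset, ih _ (by simpa using hl) i' j (by simpa using hj)]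
    have hmod : i' = (i + 1) % n := by
      rw [hi', PySem.Int.mod_eq_emod_of_pos hn]
    have hgetset : (l.set i'.toNat (l.getD i'.toNat 0 + 1)).getD j 0
        = l.getD j 0 + (if (j : Int) = i' then 1 else 0) := by
      by_cases hji : j = i'.toNat
      · subst hji
        rw [if_pos (by omega)]
        rw [List.getD_eq_getElem?_getD, List.getElem?_set_self (by omega),
            List.getD_eq_getElem?_getD]
        simp
      · rw [if_neg (by omega)]
        rw [List.getD_eq_getElem?_getD, List.getElem?_set_ne (by omega),
            ← List.getD_eq_getElem?_getD]
        ring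
    rw [hgetset]
    show some _ = some _
    congr 1
    rw [show hits n (k + 1) i (j : Int)
          = (if (j : Int) = (i + 1) % n then 1 else 0) + hits n k ((i + 1) % n) (j : Int) from rfl]
    rw [← hmod]
    ring

-- closed form for hits: k / n full rounds plus one extra for the first k % n banks after i
lemma hits_closed (n : Int) (hn : 0 < n) : ∀ (k : Nat) (i j : Int),
    0 ≤ i → i < n → 0 ≤ j → j < n →
    hits n k i j = (k : Int) / n + (if (j - i - 1) % n < (k : Int) % n then 1 else 0) := by
  intro k
  induction k with
  | zero =>
    intro i j _ _ _ _
    have h1 : 0 ≤ (j - i - 1) % n := Int.emod_nonneg _ (by omega)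
    simp [hits, Int.not_lt.mpr h1]
  | succ k ih =>
    intro i j hi0 hin hj0 hjn
    have hi'0 : 0 ≤ (i + 1) % n := Int.emod_nonneg _ (by omega)
    have hi'n : (i + 1) % n < n := Int.emod_lt_of_pos _ hn
    rw [show hits n (k + 1) i j
          = (if j = (i + 1) % n then 1 else 0) + hits n k ((i + 1) % n) j from rfl,
        ih _ j hi'0 hi'n hj0 hjn]
    -- concrete values of the two small mods
    have hiv : (i + 1) % n = if i + 1 = n then 0 else i + 1 := by
      by_cases h : i + 1 = n
      · rw [if_pos h, h]; simp
      · rw [if_neg h]; exact Int.emod_eq_of_lt (by omega) (by omega)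
    have hd : (j - i - 1) % n = if i + 1 ≤ j then j - i - 1 else j - i - 1 + n := by
      by_cases h : i + 1 ≤ j
      · rw [if_pos h]; exact Int.emod_eq_of_lt (by omega) (by omega)
      · rw [if_neg h, ← Int.add_mul_emod_self_left (c := 1)]
        rw [show j - i - 1 + n * 1 = j - i - 1 + n by ring]
        exact Int.emod_eq_of_lt (by omega) (by omega)
    have hd' : (j - (i + 1) % n - 1) % n
        = if (i + 1) % n + 1 ≤ j then j - (i + 1) % n - 1 else j - (i + 1) % n - 1 + n := by
      by_cases h : (i + 1) % n + 1 ≤ j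
      · rw [if_pos h]; exact Int.emod_eq_of_lt (by omega) (by omega)
      · rw [if_neg h, ← Int.add_mul_emod_self_left (c := 1)]
        rw [show j - (i + 1) % n - 1 + n * 1 = j - (i + 1) % n - 1 + n by ring]
        exact Int.emod_eq_of_lt (by omega) (by omega)
    -- div/mod of k and k+1
    have hk0 : 0 ≤ (k : Int) % n := Int.emod_nonneg _ (by omega)
    have hkn : (k : Int) % n < n := Int.emod_lt_of_pos _ hn
    have hkdm : n * ((k : Int) / n) + (k : Int) % n = (k : Int) := Int.mul_ediv_add_emod _ _
    have hksucc :
        (if (k : Int) % n = n - 1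
          then ((k : Int) + 1) / n = (k : Int) / n + 1 ∧ ((k : Int) + 1) % n = 0
          else ((k : Int) + 1) / n = (k : Int) / n ∧ ((k : Int) + 1) % n = (k : Int) % n + 1) := by
      by_cases h : (k : Int) % n = n - 1
      · rw [if_pos h]
        have hq : (k : Int) + 1 = n * ((k : Int) / n + 1) + 0 := by
          rw [mul_add]; omega
        constructor
        · rw [hq, add_zero, Int.mul_ediv_cancel_left _ (by omega : n ≠ 0)]
        · rw [hq, add_zero]; exact Int.mul_emod_right _ _
      · rw [if_neg h]
        have hq : (k : Int) + 1 = n * ((k : Int) / n) + ((k : Int) % n + 1) := by omega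
        constructor
        · rw [hq, add_comm (n * ((k : Int) / n)) ((k : Int) % n + 1),
              Int.add_mul_ediv_left _ _ (by omega : n ≠ 0),
              Int.ediv_eq_zero_of_lt (by omega) (by omega)]
          omega
        · conv_lhs => rw [hq, add_comm (n * ((k : Int) / n)) ((k : Int) % n + 1)]
          rw [Int.add_mul_emod_self_left]
          exact Int.emod_eq_of_lt (by omega) (by omega)
    push_cast
    split_ifs at hksucc hiv hd hd' ⊢ <;> omega

-- map over enumerate, pointwise
lemma enumerate_map_getElem {β : Type} (f : Int × Int → β) :
    ∀ (l : List Int) (s : Int) (j : Nat), j < l.length →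
    ((PySem.List.enumerate l s).map f)[j]? = some (f (s + (j : Int), l.getD j 0)) := by
  intro l
  induction l with
  | nil => intro s j hj; simp at hj
  | cons x t ih =>
    intro s j hj
    rw [PySem.List.enumerate_cons]
    cases j with
    | zero => simp
    | succ j =>
      rw [List.map_cons]
      rw [List.getElem?_cons_succ]
      have h2 : (x :: t).getD (j + 1) 0 = t.getD j 0 := rfl
      rw [ih (s + 1) j (by simpa using hj), h2]
      have h1 : s + 1 + (j : Int) = s + ((j : Nat) + (1 : Nat) : Nat) := by push_cast; ring
      rw [h1]

lemma length_enumerate_map {β : Type} (f : Int × Int → β) (l : List Int) (s : Int) :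
    ((PySem.List.enumerate l s).map f).length = l.length := by
  simp [PySem.List.length_enumerate]

-- ===== VERDICT (by name: the statement is the Claim_ definition above) =====
theorem reallocate_spec : Claim_equal_reallocate := by
  intro l _ hpre
  unfold Spec_reallocate
  obtain ⟨m, hm⟩ : ∃ m, PySem.List.max? l (fun y => y) = some m := by
    cases h : PySem.List.max? l (fun y => y) with
    | none => exact absurd ((PySem.List.max?_eq_none_iff _ _).mp h) hpre
    | some m => exact ⟨m, rfl⟩
  have hmem : m ∈ l := PySem.List.max?_mem hm
  obtain ⟨iN, hiN⟩ : ∃ iN, PySem.List.index? l m = some iN := by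
    cases h : PySem.List.index? l m with
    | none => exact absurd hmem ((PySem.List.index?_eq_none_iff _ _).mp h)
    | some iN => exact ⟨iN, rfl⟩
  obtain ⟨hiNlen, hgetiN, _⟩ := PySem.List.getElem_of_index?_eq_some hiN
  have hn0 : 0 < l.length := by cases l with | nil => exact absurd rfl hpre | cons => simp
  have hnpos : (0 : Int) < (l.length : Int) := by exact_mod_cast hn0
  -- unfold both ports to the interesting case
  unfold reallocate findMaxIndex reallocate_alt
  rw [hm]
  dsimp only
  rw [hiN]
  dsimp only [Option.getD_some]
  have hget : PySem.List.pyGetD l (iN : Int) 0 = m := by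
    rw [PySem.List.pyGetD_eq_getElem _ _ (by omega) (by exact_mod_cast hiNlen)]
    simpa using hgetiN
  have hset : PySem.List.pySetD l (iN : Int) 0 = l.set iN 0 := by
    simp [PySem.List.pySetD_natCast]
  rw [hget, hset]
  have hlenset : ((l.set iN 0).length : Int) = (l.length : Int) := by simp
  -- pointwise equality
  apply List.ext_getElem?
  intro j
  by_cases hj : j < l.length
  · -- left side via the loop characterisation
    have hL :
        (reallocLoop (l.length : Int) (l.set iN 0) (iN : Int) m)[j]?
          = some ((l.set iN 0).getD j 0 + hits (l.length : Int) m.toNat (iN : Int) (j : Int)) := by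
      by_cases hmpos : m > 0
      · have : m = ((m.toNat : Nat) : Int) := by omega
        rw [this]
        exact loop_get _ hnpos m.toNat _ hlenset (iN : Int) j (by simpa using hj)
      · rw [loop_nonpos _ _ _ _ hmpos]
        have hm0 : m.toNat = 0 := by omega
        rw [hm0]
        simp [hits, List.getD_eq_getElem?_getD,
              List.getElem?_eq_getElem (by simpa using hj : j < (l.set iN 0).length)]
    rw [hL,
        enumerate_map_getElem _ l 0 j hj,
        hits_closed _ hnpos m.toNat (iN : Int) (j : Int) (by omega)
          (by exact_mod_cast hiNlen) (by omega) (by exact_mod_cast hj)]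
    have hsetget : (l.set iN 0).getD j 0 = if (j : Int) = (iN : Int) then 0 else l.getD j 0 := by
      by_cases hji : j = iN
      · subst hji
        rw [if_pos rfl, List.getD_eq_getElem?_getD, List.getElem?_set_self (by omega)]
        simp
      · rw [if_neg (by exact_mod_cast hji), List.getD_eq_getElem?_getD,
            List.getElem?_set_ne (by omega), ← List.getD_eq_getElem?_getD]
    congr 1
    by_cases hmpos : m > 0
    · have hdm : PySem.Int.divmod? m (l.length : Int) =
          some (PySem.Int.floordiv m (l.length : Int), PySem.Int.mod m (l.length : Int)) := by
        unfold PySem.Int.divmod? PySem.Int.floordiv PySem.Int.mod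
        rw [if_neg (by omega : ¬ ((l.length : Nat) : Int) = 0)]
      simp only [if_pos hmpos, hdm, Option.getD_some, zero_add,
                 PySem.Int.floordiv_eq_ediv_of_pos hnpos, PySem.Int.mod_eq_emod_of_pos hnpos,
                 hsetget, (show ((m.toNat : Nat) : Int) = m from by omega)]
      ring
    · have hd0 : 0 ≤ ((j : Int) - (iN : Int) - 1) % ((l.length : Nat) : Int) :=
        Int.emod_nonneg _ (by omega)
      simp only [if_neg hmpos, zero_add,
                 (show ((m.toNat : Nat) : Int) = 0 from by omega),
                 Int.zero_ediv, Int.zero_emod, hsetget,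
                 PySem.Int.mod_eq_emod_of_pos hnpos]
      simp [Int.not_lt.mpr hd0]
  · -- out of range: both none
    have h1 : (reallocLoop (l.length : Int) (l.set iN 0) (iN : Int) m).length = l.length := by
      by_cases hmpos : m > 0
      · have : m = ((m.toNat : Nat) : Int) := by omega
        rw [this, loop_len]; simp
      · rw [loop_nonpos _ _ _ _ hmpos]; simp
    rw [List.getElem?_eq_none (by omega), List.getElem?_eq_none (by rw [length_enumerate_map]; omega)]
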